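-- pv_equiv track=rewrite | github.com/amsadeghi/Basic_Python_exercises | Basic_Python_Exercises.py | Matcheckrow
-- ===== SOURCE A (Python) =====
-- def Matcheckrow(M):
--   L=[]
--   for i in range(len(M)-1):
--     for j in range(i+1,len(M)):
--       L1=[]
--       for k in range(len(M[0])):
--         a=M[i][k]+M[j][k]
--         L1.append(a)
--       L.append(L1)
--   b=0
--   for i in range(len(L)):
--     if sum(L[i])==0:
--       b+=1
--   if b==1:
--     return True
--   else: return False
-- ===== SOURCE B (Python) =====
-- def Matcheckrow(M):
--     if len(M) < 2:
--         return False
--     m = len(M[0])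
--     pairs = 0
--     seen = {}
--     for row in M:
--         s = sum(row[:m])
--         pairs += seen.get(-s, 0)
--         seen[s] = seen.get(s, 0) + 1
--     return pairs == 1
-- ===== Notes on version B (the rewrite author's own statement) =====
-- stated objective: faster
-- what changed: A materialises the element-wise sum vector of every row pair and then counts zero-sum vectors; B computes each row's sum once and counts complementary-sum pairs in one pass with a dictionary of previously seen sums.
import Mathlib
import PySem

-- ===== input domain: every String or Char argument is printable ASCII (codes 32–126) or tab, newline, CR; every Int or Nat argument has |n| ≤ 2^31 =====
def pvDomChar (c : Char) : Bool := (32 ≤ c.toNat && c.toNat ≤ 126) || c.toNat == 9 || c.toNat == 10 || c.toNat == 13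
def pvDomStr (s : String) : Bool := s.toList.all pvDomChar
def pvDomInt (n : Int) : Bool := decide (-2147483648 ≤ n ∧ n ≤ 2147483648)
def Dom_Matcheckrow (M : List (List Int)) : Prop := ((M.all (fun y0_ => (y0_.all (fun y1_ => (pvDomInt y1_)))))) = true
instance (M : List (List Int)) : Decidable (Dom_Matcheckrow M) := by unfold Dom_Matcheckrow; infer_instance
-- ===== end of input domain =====

-- B replaces A's pair-by-pair vector construction by a single pass that counts complementary row sums in a dictionary.

-- ===== PORT A =====
def Matcheckrow (M : List (List Int)) : Bool :=
  let L : List (List Int) :=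
    (PySem.List.pyRange 0 ((M.length : Int) - 1) 1).foldl (fun L i =>
      (PySem.List.pyRange (i + 1) (M.length : Int) 1).foldl (fun L j =>
        let L1 : List Int :=
          (PySem.List.pyRange 0 (((M.headD []).length : Int)) 1).foldl (fun L1 k =>
            L1 ++ [PySem.List.pyGetD (PySem.List.pyGetD M i []) k 0 +
                   PySem.List.pyGetD (PySem.List.pyGetD M j []) k 0]) []
        L ++ [L1]) L) []
  let b : Int :=
    (PySem.List.pyRange 0 ((L.length : Int)) 1).foldl (fun b i =>
      if (PySem.List.pyGetD L i []).sum = 0 then b + 1 else b) 0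
  b == 1

-- ===== PORT B =====
def Matcheckrow_alt (M : List (List Int)) : Bool :=
  if M.length < 2 then false
  else
    let m : Int := ((M.headD []).length : Int)
    let st : Int × PySem.Dict Int Int := M.foldl (fun st row =>
      let s := (PySem.List.slice row none (some m)).sum
      (st.1 + st.2.getD (-s) 0, st.2.insert s (st.2.getD s 0 + 1))) (0, PySem.Dict.empty)
    st.1 == 1

-- ===== PRECONDITION & SPEC =====
-- Pre_ excludes exactly the ragged matrices on which A raises IndexError (some row shorter than the first row).
def Pre_Matcheckrow (M : List (List Int)) : Prop :=
  ∀ r ∈ M, (M.headD []).length ≤ r.length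
instance (M : List (List Int)) : Decidable (Pre_Matcheckrow M) := by unfold Pre_Matcheckrow; infer_instance

def pvWitness_Matcheckrow : List (List Int) := [[1, -1], [-1, 1]]

def Spec_Matcheckrow (M : List (List Int)) (out : Bool) : Prop := out = Matcheckrow_alt M
instance (M : List (List Int)) (out : Bool) : Decidable (Spec_Matcheckrow M out) := by unfold Spec_Matcheckrow; infer_instance

-- ===== CLAIM (what is proved, stated in full; the proofs are below) =====
def Claim_equal_Matcheckrow : Prop := ∀ (M : List (List Int)), Dom_Matcheckrow M → Pre_Matcheckrow M → Spec_Matcheckrow M (Matcheckrow M)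

-- ===== LEMMAS AND PROOFS =====

-- the per-row sum both programs reduce a row to (sum of the first m elements)
def pvF (m : Nat) (r : List Int) : Int := (r.take m).sum

-- zero-sum pair count, recursing on the list of row sums
def pvPC : List Int → Int
  | [] => 0
  | x :: t => (t.count (-x) : Int) + pvPC t

lemma pv_shift {α : Type} (x : α) (t : List α) (j : Int) (d : α) (h : 1 ≤ j) :
    PySem.List.pyGetD (x :: t) j d = PySem.List.pyGetD t (j - 1) d := by
  rw [PySem.List.pyGetD_of_nonneg (x :: t) d (by omega : (0:Int) ≤ j),
      PySem.List.pyGetD_of_nonneg t d (by omega : (0:Int) ≤ j - 1)]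
  have hj : j.toNat = (j - 1).toNat + 1 := by omega
  rw [hj, List.getD_cons_succ]

-- A's indexed double loop over pair sums lists exactly the 2-element combinations, summed
lemma pv_key (ys : List Int) :
    ((PySem.List.pyRange 0 ((ys.length : Int) - 1) 1).flatMap (fun i =>
        (PySem.List.pyRange (i + 1) (ys.length : Int) 1).map (fun j =>
          PySem.List.pyGetD ys i 0 + PySem.List.pyGetD ys j 0)))
      = (PySem.List.combinations ys 2).map List.sum := by
  induction ys with
  | nil =>
      rw [PySem.List.pyRange_one_eq_nil (by simp)]
      simp [PySem.List.combinations_nil_succ]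
  | cons x t ih =>
      rcases t with _ | ⟨y, t'⟩
      · rw [PySem.List.pyRange_one_eq_nil (by simp)]
        simp [PySem.List.combinations_cons_succ, PySem.List.combinations_nil_succ]
      · set t := y :: t' with ht
        have hn : 0 < t.length := by simp [ht]
        have hlen : ((x :: t).length : Int) - 1 = (t.length : Int) := by
          simp
        rw [hlen, PySem.List.pyRange_one_cons (by exact_mod_cast hn), List.flatMap_cons]
        -- head chunk: the i = 0 inner loop pairs x with every element of t
        have hchunk : (PySem.List.pyRange (0 + 1) ((x :: t).length : Int) 1).map (fun j =>
            PySem.List.pyGetD (x :: t) 0 0 + PySem.List.pyGetD (x :: t) j 0)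
            = t.map (fun y => x + y) := by
          have h0 : PySem.List.pyGetD (x :: t) 0 0 = x := by
            rw [PySem.List.pyGetD_of_nonneg _ _ (by omega : (0:Int) ≤ 0)]; rfl
          have hr : (PySem.List.pyRange (0 + 1) ((x :: t).length : Int) 1)
              = (PySem.List.pyRange 0 (t.length : Int) 1).map (· + 1) := by
            rw [PySem.List.pyRange_one, PySem.List.pyRange_one, List.map_map]
            have he : (((x :: t).length : Int) - (0 + 1)).toNat = ((t.length : Int) - 0).toNat := by
              simp
            rw [he]
            apply List.map_congr_left
            intro k _
            simp only [Function.comp_apply]; ring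
          rw [h0, hr, List.map_map]
          rw [List.map_congr_left (g := fun j => x + PySem.List.pyGetD t j 0) ?hcg]
          case hcg =>
            intro j hj
            rw [PySem.List.mem_pyRange_one] at hj
            simp only [Function.comp_apply]
            rw [pv_shift x t (j + 1) 0 (by omega)]
            norm_num
          calc (PySem.List.pyRange 0 (t.length : Int) 1).map (fun j => x + PySem.List.pyGetD t j 0)
              = ((PySem.List.pyRange 0 (t.length : Int) 1).map (fun j => PySem.List.pyGetD t j 0)).map (fun y => x + y) := by
                rw [List.map_map]; rfl
            _ = t.map (fun y => x + y) := by rw [PySem.List.map_pyGetD_pyRange_zero' t 0]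
        -- tail chunk: the loops for i ≥ 1 are the loops over t, indices shifted by one
        have htail : (PySem.List.pyRange (0 + 1) (t.length : Int) 1).flatMap (fun i =>
            (PySem.List.pyRange (i + 1) ((x :: t).length : Int) 1).map (fun j =>
              PySem.List.pyGetD (x :: t) i 0 + PySem.List.pyGetD (x :: t) j 0))
            = (PySem.List.pyRange 0 ((t.length : Int) - 1) 1).flatMap (fun i =>
                (PySem.List.pyRange (i + 1) (t.length : Int) 1).map (fun j =>
                  PySem.List.pyGetD t i 0 + PySem.List.pyGetD t j 0)) := by
          rw [PySem.List.pyRange_one (0 + 1) (t.length : Int), PySem.List.pyRange_one 0 ((t.length : Int) - 1)]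
          rw [List.flatMap_map, List.flatMap_map]
          have he : ((t.length : Int) - 1).toNat = ((t.length : Int) - 1 - 0).toNat := by norm_num
          rw [← he]
          apply List.flatMap_congr
          intro a _
          simp only [zero_add]
          have hga : PySem.List.pyGetD (x :: t) (1 + (a : Int)) 0 = PySem.List.pyGetD t (a : Int) 0 := by
            rw [pv_shift x t (1 + (a : Int)) 0 (by omega)]
            norm_num
          rw [hga]
          have hr2 : (PySem.List.pyRange (1 + (a : Int) + 1) ((x :: t).length : Int) 1)
              = (PySem.List.pyRange ((a : Int) + 1) (t.length : Int) 1).map (· + 1) := by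
            rw [PySem.List.pyRange_one (1 + (a : Int) + 1), PySem.List.pyRange_one (((a : Int) + 1)), List.map_map]
            have he2 : (((x :: t).length : Int) - (1 + (a : Int) + 1)).toNat
                = ((t.length : Int) - ((a : Int) + 1)).toNat := by
              simp; omega
            rw [he2]
            apply List.map_congr_left
            intro k _
            simp only [Function.comp_apply]; ring
          rw [hr2, List.map_map]
          apply List.map_congr_left
          intro j hj
          rw [PySem.List.mem_pyRange_one] at hj
          simp only [Function.comp_apply]
          rw [pv_shift x t (j + 1) 0 (by omega)]
          norm_num
        rw [hchunk, htail, ih]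
        rw [PySem.List.combinations_cons_succ x t 1, PySem.List.combinations_one t, List.map_append]
        congr 1
        rw [List.map_map, List.map_map]
        apply List.map_congr_left
        intro z _
        simp

-- counting zero sums over the combinations list is the head-recursive pair count
lemma pv_pc_eq_countP (ys : List Int) :
    (((PySem.List.combinations ys 2).countP (fun c => decide (c.sum = 0)) : Nat) : Int) = pvPC ys := by
  induction ys with
  | nil => simp [PySem.List.combinations_nil_succ, pvPC]
  | cons x t ih =>
    rw [PySem.List.combinations_cons_succ, PySem.List.combinations_one]
    simp only [List.countP_append, List.map_map, List.countP_map]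
    have hc : t.countP ((fun c => decide (c.sum = 0)) ∘ (fun c => x :: c) ∘ (fun y => [y])) = t.count (-x) := by
      rw [List.count]
      apply List.countP_congr
      intro a _
      simp only [Function.comp_apply, List.sum_cons, List.sum_nil]
      simp
      omega
    rw [pvPC, hc]
    push_cast
    rw [ih]

-- A's inner index loop sums the first m elements of a row
lemma pv_sumIdx (m : Nat) (r : List Int) (h : m ≤ r.length) :
    ((PySem.List.pyRange 0 (m : Int) 1).map (fun k => PySem.List.pyGetD r k 0)).sum
      = pvF m r := by
  have hlen : (r.take m).length = m := by simp [List.length_take]; omega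
  have hcong : ∀ k ∈ PySem.List.pyRange 0 (m : Int) 1,
      PySem.List.pyGetD r k 0 = PySem.List.pyGetD (r.take m) k 0 := by
    intro k hk
    rw [PySem.List.mem_pyRange_one] at hk
    rw [PySem.List.pyGetD_eq_getElem r 0 hk.1 (by omega),
        PySem.List.pyGetD_eq_getElem (r.take m) 0 hk.1 (by rw [hlen]; exact_mod_cast hk.2)]
    rw [List.getElem_take]
  rw [List.map_congr_left hcong]
  rw [show ((m : Int)) = ((r.take m).length : Int) by rw [hlen]]
  rw [PySem.List.map_pyGetD_pyRange_zero' (r.take m) 0]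
  rfl

-- A computes (pair count == 1) over the row sums
lemma pv_A_eq (M : List (List Int)) (hPre : Pre_Matcheckrow M) :
    Matcheckrow M = (pvPC (M.map (pvF (M.headD []).length)) == 1) := by
  unfold Matcheckrow
  simp only [PySem.List.foldl_append_singleton_eq_map, List.nil_append]
  simp only [PySem.List.foldl_append_eq_flatMap, List.nil_append]
  set m := (M.headD []).length with hm
  set ss := M.map (pvF m) with hss
  set L := (PySem.List.pyRange 0 ((M.length : Int) - 1) 1).flatMap (fun i =>
      (PySem.List.pyRange (i + 1) (M.length : Int) 1).map (fun j =>
        (PySem.List.pyRange 0 (m : Int) 1).map (fun k =>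
          PySem.List.pyGetD (PySem.List.pyGetD M i []) k 0 +
          PySem.List.pyGetD (PySem.List.pyGetD M j []) k 0))) with hL
  have hb : (PySem.List.pyRange 0 ((L.length : Int)) 1).foldl (fun b i =>
      if (PySem.List.pyGetD L i []).sum = 0 then b + 1 else b) (0 : Int)
      = ((L.countP (fun l => decide (l.sum = 0)) : Nat) : Int) := by
    rw [PySem.List.foldl_pyRange_zero_pyGetD' L []
        (fun (b : Int) (l : List Int) => if l.sum = 0 then b + 1 else b) 0]
    rw [PySem.List.foldl_ite_add_one (fun (l : List Int) => l.sum = 0) L 0]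
    norm_num
  rw [hb]
  -- the list of pair-sum vectors, mapped to sums, is the combinations list of row sums
  have hmap : L.map List.sum = (PySem.List.combinations ss 2).map List.sum := by
    rw [hL, List.map_flatMap]
    have : ∀ i ∈ PySem.List.pyRange 0 ((M.length : Int) - 1) 1,
        ((PySem.List.pyRange (i + 1) (M.length : Int) 1).map (fun j =>
          (PySem.List.pyRange 0 (m : Int) 1).map (fun k =>
            PySem.List.pyGetD (PySem.List.pyGetD M i []) k 0 +
            PySem.List.pyGetD (PySem.List.pyGetD M j []) k 0))).map List.sum
        = (PySem.List.pyRange (i + 1) ((ss.length : Int)) 1).map (fun j =>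
            PySem.List.pyGetD ss i 0 + PySem.List.pyGetD ss j 0) := by
      intro i hi
      rw [PySem.List.mem_pyRange_one] at hi
      rw [List.map_map]
      have hlen : (ss.length : Int) = (M.length : Int) := by rw [hss]; simp
      rw [hlen]
      apply List.map_congr_left
      intro j hj
      rw [PySem.List.mem_pyRange_one] at hj
      simp only [Function.comp_apply]
      have hrow : ∀ (idx : Int), 0 ≤ idx → idx < (M.length : Int) →
          PySem.List.pyGetD ss idx 0 = pvF m (PySem.List.pyGetD M idx []) ∧
          m ≤ (PySem.List.pyGetD M idx []).length := by
        intro idx h0 h1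
        have hgd : PySem.List.pyGetD M idx [] = M[idx.toNat]'(by omega) := by
          exact PySem.List.pyGetD_eq_getElem M [] h0 h1
        constructor
        · have hz : (0 : Int) = pvF m [] := by simp [pvF]
          rw [hss, hz, PySem.List.pyGetD_map (pvF m) M idx []]
        · rw [hgd]; exact hPre _ (List.getElem_mem _)
      obtain ⟨hgi, hmi⟩ := hrow i hi.1 (by omega)
      obtain ⟨hgj, hmj⟩ := hrow j (by omega) hj.2
      rw [PySem.List.sum_map_add_int]
      rw [pv_sumIdx m _ hmi, pv_sumIdx m _ hmj, hgi, hgj]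
    rw [List.flatMap_congr this]
    have hlen2 : (M.length : Int) - 1 = (ss.length : Int) - 1 := by rw [hss]; simp
    rw [hlen2, pv_key ss]
  -- transfer the count through the map to sums
  have hcnt : L.countP (fun l => decide (l.sum = 0))
      = (PySem.List.combinations ss 2).countP (fun c => decide (c.sum = 0)) := by
    have h1 : (L.map List.sum).countP (fun s => decide (s = 0))
        = L.countP (fun l => decide (l.sum = 0)) := by
      rw [List.countP_map]; rfl
    have h2 : ((PySem.List.combinations ss 2).map List.sum).countP (fun s => decide (s = 0))
        = (PySem.List.combinations ss 2).countP (fun c => decide (c.sum = 0)) := by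
      rw [List.countP_map]; rfl
    rw [← h1, ← h2, hmap]
  rw [hcnt, pv_pc_eq_countP ss]

-- B's dictionary pass counts, for each row, the earlier rows with the complementary sum
lemma pv_foldB (xs : List Int) : ∀ (p : List Int) (acc : Int) (d : PySem.Dict Int Int),
    (∀ v : Int, d.getD v 0 = (p.count v : Int)) →
    (xs.foldl (fun (st : Int × PySem.Dict Int Int) s =>
        (st.1 + st.2.getD (-s) 0, st.2.insert s (st.2.getD s 0 + 1))) (acc, d)).1
      = acc + (xs.map (fun b => (p.count (-b) : Int))).sum + pvPC xs := by
  induction xs with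
  | nil => intro p acc d hd; simp [pvPC]
  | cons b rest ih =>
    intro p acc d hd
    simp only [List.foldl_cons]
    have hd' : ∀ v : Int, (d.insert b (d.getD b 0 + 1)).getD v 0 = ((p ++ [b]).count v : Int) := by
      intro v
      rw [PySem.Dict.getD_insert, List.count_append]
      by_cases hv : v = b
      · subst hv; simp [hd]
      · have hb : ¬ (b == v) = true := by simp; omega
        simp [hv, hd, List.count_singleton, hb]
    rw [ih (p ++ [b]) (acc + d.getD (-b) 0) _ hd']
    rw [hd]
    have h1 : ∀ c : Int, ((p ++ [b]).count (-c) : Int)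
        = (p.count (-c) : Int) + (if (c == -b) = true then (1:Int) else 0) := by
      intro c
      rw [List.count_append]
      by_cases hc : c = -b
      · subst hc
        simp
      · have h2 : ¬ (b == -c) = true := by simp; omega
        have h3 : ¬ (c == -b) = true := by simp; omega
        simp [List.count_singleton, h2, h3]
    have hsum : (rest.map (fun c => ((p ++ [b]).count (-c) : Int))).sum
        = (rest.map (fun c => (p.count (-c) : Int))).sum + (rest.count (-b) : Int) := by
      rw [List.map_congr_left (fun c _ => h1 c)]
      rw [PySem.List.sum_map_add_int rest (fun c => (p.count (-c) : Int))
          (fun c => if (c == -b) = true then (1:Int) else 0)]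
      congr 1
      rw [PySem.List.sum_map_ite_one_zero (fun c => c == -b) rest]
      rw [List.count]
    rw [hsum, pvPC]
    simp only [List.map_cons, List.sum_cons]
    ring

-- B computes (pair count == 1) over the row sums (and False for fewer than two rows)
lemma pv_B_eq (M : List (List Int)) (h2 : ¬ M.length < 2) :
    Matcheckrow_alt M = (pvPC (M.map (pvF (M.headD []).length)) == 1) := by
  unfold Matcheckrow_alt
  rw [if_neg h2]
  have hs : ∀ row : List Int,
      (PySem.List.slice row none (some ((M.headD []).length : Int))).sum = pvF (M.headD []).length row := by
    intro row
    rw [PySem.List.slice_to row (by positivity)]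
    simp [pvF]
  simp only [hs]
  have hfold : M.foldl (fun (st : Int × PySem.Dict Int Int) row =>
        (st.1 + st.2.getD (-(pvF (M.headD []).length row)) 0,
         st.2.insert (pvF (M.headD []).length row) (st.2.getD (pvF (M.headD []).length row) 0 + 1)))
        (0, PySem.Dict.empty)
      = (M.map (pvF (M.headD []).length)).foldl (fun (st : Int × PySem.Dict Int Int) s =>
        (st.1 + st.2.getD (-s) 0, st.2.insert s (st.2.getD s 0 + 1))) (0, PySem.Dict.empty) := by
    rw [List.foldl_map]
  rw [hfold, pv_foldB _ [] 0 PySem.Dict.empty (by intro v; simp [PySem.Dict.getD_empty])]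
  have hz : (List.map (fun b => ((List.count (-b) ([]:List Int)) : Int)) (List.map (pvF (M.headD []).length) M)).sum = 0 := by
    have : ((fun b => ((List.count (-b) ([]:List Int)):Int)) ∘ pvF (M.headD []).length) = fun _ => (0:Int) := by
      funext r; simp
    simp only [List.map_map, this, List.map_const']
    simp
  rw [hz]
  norm_num

-- ===== VERDICT (by name: the statement is the Claim_ definition above) =====
theorem Matcheckrow_spec : Claim_equal_Matcheckrow := by
  intro M hDom hPre
  unfold Spec_Matcheckrow
  by_cases h2 : M.length < 2
  · rw [pv_A_eq M hPre]
    unfold Matcheckrow_alt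
    rw [if_pos h2]
    rcases M with _ | ⟨r, _ | ⟨r', t⟩⟩
    · simp [pvPC]
    · simp [pvPC]
    · simp at h2
  · rw [pv_A_eq M hPre, pv_B_eq M h2]
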